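-- pv_equiv track=rewrite | github.com/DancingOnAir/LeetcodePythonSolution | Backtracking/2375_construct_smallest_number_from_di_string.py | smallestNumber1
-- ===== SOURCE A (Python) =====
-- def smallestNumber1(pattern: str) -> str:
--     n = len(pattern)
--     res = [str(i) for i in range(1, n + 2)]
--
--     i, j = 0, 0
--     while i < n:
--         if pattern[i] == 'I':
--             i += 1
--             j += 1
--         else:
--             cnt = 0
--             while i < n and pattern[i] == 'D':
--                 i += 1
--                 cnt += 1
--             res[j: j + cnt + 1] = res[j: j + cnt + 1][::-1]
--             j = i
--
--     return ''.join(res)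
-- ===== SOURCE B (Python) =====
-- def smallestNumber1(pattern: str) -> str:
--     n = len(pattern)
--     stack = []
--     out = []
--     for i in range(n + 1):
--         stack.append(i + 1)
--         if i == n or pattern[i] == 'I':
--             while stack:
--                 out.append(str(stack.pop()))
--     return ''.join(out)
-- ===== Notes on version B (the rewrite author's own statement) =====
-- stated objective: alternative
-- what changed: Replaces the index-scanning while loop that detects each descending run and reverses a slice of a prebuilt 1..n+1 list in place by a single forward pass that pushes i+1 onto a stack each step and pops the whole stack into the output at every 'I' and at the end.
import Mathlib
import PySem

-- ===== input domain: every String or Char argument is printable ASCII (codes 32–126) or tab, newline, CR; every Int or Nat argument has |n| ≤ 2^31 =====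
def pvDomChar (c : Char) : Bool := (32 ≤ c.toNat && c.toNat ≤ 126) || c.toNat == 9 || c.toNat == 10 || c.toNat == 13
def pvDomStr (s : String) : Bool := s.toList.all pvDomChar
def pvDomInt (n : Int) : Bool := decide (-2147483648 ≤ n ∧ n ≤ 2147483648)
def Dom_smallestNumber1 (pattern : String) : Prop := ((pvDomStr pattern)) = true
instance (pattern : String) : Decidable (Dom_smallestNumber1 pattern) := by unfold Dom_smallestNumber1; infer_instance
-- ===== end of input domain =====

-- B replaces A's run-detect-and-slice-reverse loop by a single forward pass that pushes i+1 on a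
-- stack and pops the whole stack into the output at each 'I' and at the end (objective: alternative).

-- ===== PORT A =====
-- inner 'while i < n and pattern[i] == "D"' on the suffix starting at i: counts the leading 'D's
def pvCountD : List Char → Nat
  | [] => 0
  | c :: rest => if c = 'D' then pvCountD rest + 1 else 0

-- the outer while loop; fuel only makes the Lean function total (each iteration uses one unit;
-- n+1 units suffice whenever the Python loop terminates, i.e. on 'I'/'D'-only patterns)
def pvLoopA (cs : List Char) (res : List String) (i j : Nat) : Nat → List String
  | 0 => res
  | f + 1 =>
    if i < cs.length then
      -- pattern[i]: i < n is guaranteed by the guard, so getD is exact here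
      if cs.getD i ' ' = 'I' then
        pvLoopA cs res (i + 1) (j + 1) f
      else
        let cnt := pvCountD (cs.drop i)
        -- res[j : j+cnt+1] = res[j : j+cnt+1][::-1]; for 0 ≤ j the Python slice assignment is
        -- exactly this take/drop splice (both clamp past the end the same way)
        let res' := res.take j ++ ((res.drop j).take (cnt + 1)).reverse ++ res.drop (j + cnt + 1)
        pvLoopA cs res' (i + cnt) (i + cnt) f
    else res

def smallestNumber1 (pattern : String) : String :=
  let cs := pattern.toList
  let n := cs.length
  let res := (PySem.List.pyRange 1 ((n : Int) + 2) 1).map PySem.Int.toStr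
  PySem.Str.join "" (pvLoopA cs res 0 0 (n + 1))

-- ===== PORT B =====
-- 'while stack: out.append(str(stack.pop()))' — stack held with its top at the head
def pvDrain : List Int → List String → List String
  | [], out => out
  | x :: rest, out => pvDrain rest (out ++ [PySem.Int.toStr x])

-- the iterations of 'for i in range(n + 1)' with i < n, one per pattern character; k = i + 1
def pvLoopB : List Char → Int → List Int → List String → List Int × List String
  | [], _, st, out => (st, out)
  | c :: rest, k, st, out =>
    if c = 'I' then pvLoopB rest (k + 1) [] (pvDrain (k :: st) out)
    else pvLoopB rest (k + 1) (k :: st) out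

def smallestNumber1_alt (pattern : String) : String :=
  let cs := pattern.toList
  let n := cs.length
  let p := pvLoopB cs 1 [] []
  -- the final iteration i = n: push n+1, then 'i == n' flushes unconditionally
  PySem.Str.join "" (pvDrain (((n : Int) + 1) :: p.1) p.2)

-- ===== PRECONDITION & SPEC =====
-- Pre_ excludes exactly the patterns containing a character other than 'I'/'D':
-- there A's outer while loop never advances i (infinite loop), so A returns on no such input.
def Pre_smallestNumber1 (pattern : String) : Prop :=
  (pattern.toList.all (fun c => c == 'I' || c == 'D')) = true
instance (pattern : String) : Decidable (Pre_smallestNumber1 pattern) := by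
  unfold Pre_smallestNumber1; infer_instance

def pvWitness_smallestNumber1 : String := "IDDI"

def Spec_smallestNumber1 (pattern : String) (out : String) : Prop := out = smallestNumber1_alt pattern
instance (pattern : String) (out : String) : Decidable (Spec_smallestNumber1 pattern out) := by
  unfold Spec_smallestNumber1; infer_instance

-- ===== CLAIM (what is proved, stated in full; the proofs are below) =====
def Claim_equal_smallestNumber1 : Prop := ∀ (pattern : String), Dom_smallestNumber1 pattern → Pre_smallestNumber1 pattern → Spec_smallestNumber1 pattern (smallestNumber1 pattern)

-- ===== LEMMAS AND PROOFS =====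

-- ascending run of m integers starting at k (the values A's initial res holds from some point on)
def pvAsc (k : Int) (m : Nat) : List Int := (List.range m).map (fun t => k + t)

-- the common segment spec: what remains to be emitted given the pending stack st
def pvSeg : List Char → Int → List Int → List String
  | [], k, st => (k :: st).map PySem.Int.toStr
  | c :: rest, k, st =>
    if c = 'I' then ((k :: st).map PySem.Int.toStr) ++ pvSeg rest (k + 1) []
    else pvSeg rest (k + 1) (k :: st)

-- push k, k+1, …, k+c-1 (in that order) onto st
def pvPush : Nat → Int → List Int → List Int
  | 0, _, st => st
  | c + 1, k, st => pvPush c (k + 1) (k :: st)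

theorem pvDrain_eq (st : List Int) (out : List String) :
    pvDrain st out = out ++ st.map PySem.Int.toStr := by
  induction st generalizing out with
  | nil => simp [pvDrain]
  | cons x rest ih => simp [pvDrain, ih]

theorem pvAsc_snoc' (k : Int) (m : Nat) : pvAsc k (m + 1) = pvAsc k m ++ [k + m] := by
  simp [pvAsc, List.range_succ]

theorem pvAsc_succ (k : Int) (m : Nat) : pvAsc k (m + 1) = k :: pvAsc (k + 1) m := by
  induction m generalizing k with
  | zero => simp [pvAsc]
  | succ m ih =>
    rw [pvAsc_snoc', ih, pvAsc_snoc']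
    simp only [List.cons_append]
    congr 2
    push_cast; ring

theorem pvPush_eq (c : Nat) (k : Int) (st : List Int) :
    pvPush c k st = (pvAsc k c).reverse ++ st := by
  induction c generalizing k st with
  | zero => simp [pvPush, pvAsc]
  | succ c ih =>
    rw [pvPush, ih, pvAsc_succ]
    simp

theorem pvAsc_length (k : Int) (m : Nat) : (pvAsc k m).length = m := by simp [pvAsc]

theorem pvAsc_take (k : Int) (m t : Nat) : (pvAsc k m).take t = pvAsc k (min t m) := by
  induction t generalizing k m with
  | zero => simp [pvAsc]
  | succ t ih =>
    cases m with
    | zero => simp [pvAsc]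
    | succ m =>
      rw [pvAsc_succ, List.take_succ_cons, ih,
        show min (t + 1) (m + 1) = min t m + 1 by omega, pvAsc_succ]

theorem pvAsc_drop (k : Int) (m t : Nat) : (pvAsc k m).drop t = pvAsc (k + t) (m - t) := by
  induction t generalizing k m with
  | zero => simp
  | succ t ih =>
    cases m with
    | zero => simp [pvAsc]
    | succ m =>
      rw [pvAsc_succ, List.drop_succ_cons, ih]
      congr 1
      · push_cast; ring
      · omega

theorem pvCountD_le (s : List Char) : pvCountD s ≤ s.length := by
  induction s with
  | nil => simp [pvCountD]
  | cons c rest ih =>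
    by_cases h : c = 'D'
    · simp [pvCountD, h]; omega
    · simp [pvCountD, h]

theorem pvCountD_drop_head (s : List Char) (c' : Char)
    (h : (s.drop (pvCountD s)).head? = some c') : c' ≠ 'D' := by
  induction s with
  | nil => simp [pvCountD] at h
  | cons c rest ih =>
    by_cases hc : c = 'D'
    · rw [pvCountD, if_pos hc] at h
      simp only [List.drop_succ_cons] at h
      exact ih h
    · rw [pvCountD, if_neg hc] at h
      simp at h
      intro hd; exact hc (h ▸ hd)

theorem pvSeg_run (s : List Char) (k : Int) (st : List Int) :
    pvSeg s k st = pvSeg (s.drop (pvCountD s)) (k + pvCountD s) (pvPush (pvCountD s) k st) := by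
  induction s generalizing k st with
  | nil => simp [pvCountD, pvPush]
  | cons c rest ih =>
    by_cases hc : c = 'D'
    · have hI : c ≠ 'I' := by rw [hc]; decide
      rw [pvSeg, if_neg hI, pvCountD, if_pos hc, ih (k + 1) (k :: st)]
      simp only [List.drop_succ_cons, pvPush]
      congr 1
      push_cast; ring
    · rw [pvCountD, if_neg hc]
      simp [pvPush]

-- B's loop computes pvSeg
theorem pvLoopB_eq (cs : List Char) (k : Int) (st : List Int) (out : List String) :
    (pvLoopB cs k st out).2
      ++ (((k + cs.length) :: (pvLoopB cs k st out).1).map PySem.Int.toStr)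
      = out ++ pvSeg cs k st := by
  induction cs generalizing k st out with
  | nil => simp [pvLoopB, pvSeg]
  | cons c rest ih =>
    by_cases hc : c = 'I'
    · rw [pvLoopB, if_pos hc, pvSeg, if_pos hc, pvDrain_eq,
        show k + ((c :: rest) : List Char).length = (k + 1) + rest.length by
          push_cast [List.length_cons]; ring,
        ih (k + 1) [] (out ++ (k :: st).map PySem.Int.toStr)]
      simp
    · rw [pvLoopB, if_neg hc, pvSeg, if_neg hc]
      rw [show k + ((c :: rest) : List Char).length = (k + 1) + rest.length by push_cast [List.length_cons]; ring]
      exact ih (k + 1) (k :: st) out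

theorem pvAsc_pyRange (k : Int) (m : Nat) : pvAsc k m = PySem.List.pyRange k (k + m) 1 := by
  induction m with
  | zero =>
    rw [PySem.List.pyRange_one_eq_nil (by simp)]
    simp [pvAsc]
  | succ m ih =>
    rw [pvAsc_snoc', ih,
      show k + ((m + 1 : Nat) : Int) = (k + m) + 1 by push_cast; ring,
      PySem.List.pyRange_one_succ_right (by simp)]

-- A's loop computes pvSeg: main invariant lemma, strong induction packaged as induction on a bound m
theorem pvLoopA_eq (cs : List Char) (hP : ∀ c ∈ cs, c = 'I' ∨ c = 'D') :
    ∀ (m j : Nat) (pref : List String) (f : Nat),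
      cs.length - j ≤ m → j ≤ cs.length → pref.length = j → cs.length + 1 - j ≤ f →
      pvLoopA cs (pref ++ (pvAsc ((j : Int) + 1) (cs.length + 1 - j)).map PySem.Int.toStr) j j f
        = pref ++ pvSeg (cs.drop j) ((j : Int) + 1) [] := by
  intro m
  induction m with
  | zero =>
    intro j pref f hm hj hpref hf
    have hjL : j = cs.length := by omega
    subst hjL
    obtain ⟨f, rfl⟩ : ∃ f', f = f' + 1 := ⟨f - 1, by omega⟩
    rw [pvLoopA, if_neg (by omega)]
    simp [show cs.length + 1 - cs.length = 1 by omega, pvAsc, pvSeg, List.drop_length]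
  | succ m ih =>
    intro j pref f hm hj hpref hf
    by_cases hjL : j = cs.length
    · subst hjL
      obtain ⟨f, rfl⟩ : ∃ f', f = f' + 1 := ⟨f - 1, by omega⟩
      rw [pvLoopA, if_neg (by omega)]
      simp [show cs.length + 1 - cs.length = 1 by omega, pvAsc, pvSeg, List.drop_length]
    · have hlt : j < cs.length := by omega
      have hdrop : cs.drop j = cs[j] :: cs.drop (j + 1) := List.drop_eq_getElem_cons hlt
      have hget : cs.getD j ' ' = cs[j] := by
        simp [List.getD_eq_getElem?_getD, List.getElem?_eq_getElem hlt]
      rcases hP cs[j] (List.getElem_mem hlt) with hI | hD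
      · -- pattern[j] = 'I'
        obtain ⟨f, rfl⟩ : ∃ f', f = f' + 1 := ⟨f - 1, by omega⟩
        rw [pvLoopA, if_pos hlt, hget, hI, if_pos rfl,
          show cs.length + 1 - j = (cs.length + 1 - (j + 1)) + 1 by omega, pvAsc_succ,
          List.map_cons, List.append_cons,
          show ((j : Int) + 1) + 1 = ((j + 1 : Nat) : Int) + 1 by push_cast; ring]
        rw [ih (j + 1) (pref ++ [PySem.Int.toStr ((j : Int) + 1)]) f (by omega) (by omega)
          (by simp [hpref]) (by omega)]
        rw [hdrop, pvSeg, if_pos hI,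
          show ((j : Int) + 1) + 1 = ((j + 1 : Nat) : Int) + 1 by push_cast; ring]
        simp
      · -- pattern[j] = 'D'
        have hcnt : pvCountD (cs.drop j) = pvCountD (cs.drop (j + 1)) + 1 := by
          rw [hdrop, pvCountD, if_pos hD]
        set c := pvCountD (cs.drop j) with hc
        have hc1 : 1 ≤ c := by omega
        have hcle : c ≤ cs.length - j := by
          have := pvCountD_le (cs.drop j)
          rw [List.length_drop] at this
          omega
        obtain ⟨f, rfl⟩ : ∃ f', f = f' + 1 := ⟨f - 1, by omega⟩
        rw [pvLoopA, if_pos hlt, hget, hD, if_neg (by decide), ← hc]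
        simp only []
        -- compute the spliced list
        have hres : (pref ++ (pvAsc ((j : Int) + 1) (cs.length + 1 - j)).map PySem.Int.toStr).take j
            ++ ((((pref ++ (pvAsc ((j : Int) + 1) (cs.length + 1 - j)).map PySem.Int.toStr).drop j).take (c + 1)).reverse)
            ++ (pref ++ (pvAsc ((j : Int) + 1) (cs.length + 1 - j)).map PySem.Int.toStr).drop (j + c + 1)
            = (pref ++ ((((j : Int) + 1 + c) :: (pvAsc ((j : Int) + 1) c).reverse).map PySem.Int.toStr))
              ++ (pvAsc (((j + c + 1 : Nat) : Int) + 1) (cs.length + 1 - (j + c + 1))).map PySem.Int.toStr := by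
          rw [List.take_left' hpref, List.drop_left' hpref,
            show j + c + 1 = j + (c + 1) by omega, ← List.drop_drop, List.drop_left' hpref,
            ← List.map_take, ← List.map_drop, ← List.map_reverse,
            pvAsc_take, show min (c + 1) (cs.length + 1 - j) = c + 1 by omega,
            pvAsc_snoc', pvAsc_drop]
          simp only [List.reverse_append, List.reverse_cons, List.reverse_nil,
            List.nil_append, List.cons_append, List.map_cons, List.append_assoc]
          have e1 : ((j + (c + 1) : Nat) : Int) + 1 = (j : Int) + 1 + ((c + 1 : Nat) : Int) := by
            push_cast; ring
          have e2 : cs.length + 1 - (j + (c + 1)) = cs.length + 1 - j - (c + 1) := by omega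
          rw [e1, e2]
        rw [hres]
        by_cases hend : j + c = cs.length
        · -- the run reaches the end of the pattern: next check of the guard exits
          obtain ⟨f, rfl⟩ : ∃ f', f = f' + 1 := ⟨f - 1, by omega⟩
          rw [pvLoopA, if_neg (by omega)]
          rw [pvSeg_run (cs.drop j), List.drop_drop, ← hc,
            show j + c = cs.length by omega, List.drop_length, pvSeg]
          simp [pvPush_eq, pvAsc]
        · -- the run is followed by an 'I' (it is maximal and the next char is not 'D')
          have hlt2 : j + c < cs.length := by omega
          have hdrop2 : cs.drop (j + c) = cs[j + c] :: cs.drop (j + c + 1) :=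
            List.drop_eq_getElem_cons hlt2
          have hne : cs[j + c] ≠ 'D' := by
            apply pvCountD_drop_head (cs.drop j)
            rw [← hc, List.drop_drop, hdrop2]
            rfl
          have hI2 : cs[j + c] = 'I' := by
            rcases hP cs[j + c] (List.getElem_mem hlt2) with h | h
            · exact h
            · exact absurd h hne
          have hget2 : cs.getD (j + c) ' ' = cs[j + c] := by
            simp [List.getD_eq_getElem?_getD, List.getElem?_eq_getElem hlt2]
          obtain ⟨f, rfl⟩ : ∃ f', f = f' + 1 := ⟨f - 1, by omega⟩
          rw [pvLoopA, if_pos hlt2, hget2, hI2, if_pos rfl]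
          rw [show j + c + 1 = (j + c) + 1 from rfl]
          rw [ih ((j + c) + 1)
            (pref ++ (((j : Int) + 1 + c) :: (pvAsc ((j : Int) + 1) c).reverse).map PySem.Int.toStr)
            f (by omega) (by omega) (by simp [hpref, pvAsc_length]; omega) (by omega)]
          rw [pvSeg_run (cs.drop j), List.drop_drop, ← hc, hdrop2, pvSeg, if_pos hI2]
          simp [pvPush_eq, List.append_assoc]
          have e3 : (j : Int) + ↑c + 1 + 1 = ↑j + 1 + ↑c + 1 := by ring
          rw [e3]

-- ===== VERDICT (by name: the statement is the Claim_ definition above) =====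
theorem smallestNumber1_spec : Claim_equal_smallestNumber1 := by
  intro pattern _ hPre
  unfold Pre_smallestNumber1 at hPre
  simp only [List.all_eq_true, Bool.or_eq_true, beq_iff_eq] at hPre
  unfold Spec_smallestNumber1 smallestNumber1 smallestNumber1_alt
  simp only []
  have hrange : PySem.List.pyRange 1 ((pattern.toList.length : Int) + 2) 1
      = pvAsc 1 (pattern.toList.length + 1) := by
    rw [pvAsc_pyRange]
    congr 1
    push_cast; ring
  have hA := pvLoopA_eq pattern.toList hPre pattern.toList.length 0 [] (pattern.toList.length + 1)
    (by omega) (by omega) rfl (by omega)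
  simp only [Nat.cast_zero, zero_add, Nat.sub_zero, List.nil_append, List.drop_zero] at hA
  have hB := pvLoopB_eq pattern.toList 1 [] []
  rw [show (1 : Int) + (pattern.toList.length : Int) = (pattern.toList.length : Int) + 1 by ring,
    List.nil_append] at hB
  rw [hrange, hA, pvDrain_eq, hB]
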